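-- pv_equiv track=rewrite | github.com/tu95ctv/ocom_ref | bds/models/main_fetch_common.py | _muc_dt
-- ===== SOURCE A (Python) =====
-- def _muc_dt(choose_area):
--         muc_dt_list = [('0','0'), ('<10','<10'),('10-20','10-20'),('20-30','20-30'),('30-40','30-40'),('40-50','40-50'),('50-60','50-60'),('60-70','60-70'),('>70','>70')]
--         selection = None
--         for muc_gia_can_tren in range(0,8):
--             if choose_area <= muc_gia_can_tren*10:
--                 selection = muc_dt_list[muc_gia_can_tren][0]
--                 break
--         if not selection:
--             selection = muc_dt_list[-1][0]
--         return selection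
-- ===== SOURCE B (Python) =====
-- def _muc_dt(choose_area):
--     labels = ['0', '<10', '10-20', '20-30', '30-40', '40-50', '50-60', '60-70', '>70']
--     if choose_area <= 0:
--         return '0'
--     if not (choose_area <= 70):
--         return '>70'
--     return labels[-(-choose_area // 10)]
-- ===== Notes on version B (the rewrite author's own statement) =====
-- stated objective: simpler
-- what changed: Replaces the linear scan over the eight thresholds with a closed-form bucket index: handle the two tails, then index the label list at the ceiling division -(-choose_area//10).
import Mathlib
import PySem

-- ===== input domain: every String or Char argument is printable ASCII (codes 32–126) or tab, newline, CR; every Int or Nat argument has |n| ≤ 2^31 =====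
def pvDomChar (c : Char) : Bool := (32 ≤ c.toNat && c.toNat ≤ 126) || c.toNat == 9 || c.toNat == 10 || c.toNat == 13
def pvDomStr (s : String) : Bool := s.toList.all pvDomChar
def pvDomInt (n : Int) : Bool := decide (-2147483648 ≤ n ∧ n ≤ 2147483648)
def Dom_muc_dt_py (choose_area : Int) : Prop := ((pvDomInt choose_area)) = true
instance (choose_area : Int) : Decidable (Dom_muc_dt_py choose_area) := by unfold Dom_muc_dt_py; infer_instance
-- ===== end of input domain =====

-- B replaces A's linear threshold scan with a closed-form bucket index (tails first, then ceiling division); same labels, same values.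


-- ===== PORT A =====
def mucList : List (String × String) :=
  [("0","0"), ("<10","<10"), ("10-20","10-20"), ("20-30","20-30"), ("30-40","30-40"),
   ("40-50","40-50"), ("50-60","50-60"), ("60-70","60-70"), (">70",">70")]

-- the 'for muc_gia_can_tren in range(0,8): if … : selection = …; break' loop
def mucLoopA (choose_area : Int) : List Int → Option String
  | [] => none
  | k :: rest =>
    if choose_area ≤ k * 10 then
      ((PySem.List.pyGet? mucList k).map (·.1))
    else mucLoopA choose_area rest

def muc_dt_py (choose_area : Int) : String :=
  let selection := mucLoopA choose_area (PySem.List.pyRange 0 8 1)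
  -- 'if not selection: selection = muc_dt_list[-1][0]'  (None or empty string are falsy)
  match selection with
  | none => ((PySem.List.pyGet? mucList (-1)).map (·.1)).getD ""
  | some s => if s = "" then ((PySem.List.pyGet? mucList (-1)).map (·.1)).getD "" else s

-- ===== PORT B =====
def muc_dt_py_alt (choose_area : Int) : String :=
  let labels := ["0", "<10", "10-20", "20-30", "30-40", "40-50", "50-60", "60-70", ">70"]
  if choose_area ≤ 0 then "0"
  else if ¬ (choose_area ≤ 70) then ">70"
  else (PySem.List.pyGet? labels (-(PySem.Int.floordiv (-choose_area) 10))).getD ""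

-- ===== PRECONDITION & SPEC =====
def Spec_muc_dt_py (choose_area : Int) (out : String) : Prop := out = muc_dt_py_alt choose_area
instance (choose_area : Int) (out : String) : Decidable (Spec_muc_dt_py choose_area out) := by unfold Spec_muc_dt_py; infer_instance

-- ===== CLAIM (what is proved, stated in full; the proofs are below) =====
def Claim_equal_muc_dt_py : Prop := ∀ (choose_area : Int), Dom_muc_dt_py choose_area → Spec_muc_dt_py choose_area (muc_dt_py choose_area)

-- ===== LEMMAS AND PROOFS =====

-- closed-form value of the ceiling-division index on each middle bucket
theorem ceil10_eq (x q : Int) (hq : (q - 1) * 10 < x) (hq' : x ≤ q * 10) :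
    -(PySem.Int.floordiv (-x) 10) = q := by
  rw [PySem.Int.neg_floordiv_neg_eq_iff_of_pos (by norm_num)]
  exact ⟨hq, hq'⟩

-- ===== VERDICT (by name: the statement is the Claim_ definition above) =====
theorem muc_dt_py_spec : Claim_equal_muc_dt_py := by
  intro x _
  unfold Spec_muc_dt_py
  have hr : PySem.List.pyRange 0 8 1 = [0, 1, 2, 3, 4, 5, 6, 7] := by decide
  by_cases h0 : x ≤ (0:Int)
  · have eA : mucLoopA x [0,1,2,3,4,5,6,7] = some "0" := by
      simp only [mucLoopA]
      rw [if_pos (by omega)]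
      rfl
    simp only [muc_dt_py, hr, eA, muc_dt_py_alt]
    rw [if_pos h0]
    rfl
  · by_cases h1 : x ≤ (10:Int)
    · have eA : mucLoopA x [0,1,2,3,4,5,6,7] = some "<10" := by
        simp only [mucLoopA]
        rw [if_neg (by omega : ¬ x ≤ (0:Int)*10)]
        rw [if_pos (by omega)]
        rfl
      have hidx : -(PySem.Int.floordiv (-x) 10) = 1 := ceil10_eq x 1 (by omega) h1
      simp only [muc_dt_py, hr, eA, muc_dt_py_alt]
      rw [hidx, if_neg h0, if_neg (not_not_intro (show x ≤ (70:Int) by omega))]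
      decide
    · by_cases h2 : x ≤ (20:Int)
      · have eA : mucLoopA x [0,1,2,3,4,5,6,7] = some "10-20" := by
          simp only [mucLoopA]
          rw [if_neg (by omega : ¬ x ≤ (0:Int)*10)]
          rw [if_neg (by omega : ¬ x ≤ (1:Int)*10)]
          rw [if_pos (by omega)]
          rfl
        have hidx : -(PySem.Int.floordiv (-x) 10) = 2 := ceil10_eq x 2 (by omega) h2
        simp only [muc_dt_py, hr, eA, muc_dt_py_alt]
        rw [hidx, if_neg h0, if_neg (not_not_intro (show x ≤ (70:Int) by omega))]
        decide
      · by_cases h3 : x ≤ (30:Int)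
        · have eA : mucLoopA x [0,1,2,3,4,5,6,7] = some "20-30" := by
            simp only [mucLoopA]
            rw [if_neg (by omega : ¬ x ≤ (0:Int)*10)]
            rw [if_neg (by omega : ¬ x ≤ (1:Int)*10)]
            rw [if_neg (by omega : ¬ x ≤ (2:Int)*10)]
            rw [if_pos (by omega)]
            rfl
          have hidx : -(PySem.Int.floordiv (-x) 10) = 3 := ceil10_eq x 3 (by omega) h3
          simp only [muc_dt_py, hr, eA, muc_dt_py_alt]
          rw [hidx, if_neg h0, if_neg (not_not_intro (show x ≤ (70:Int) by omega))]
          decide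
        · by_cases h4 : x ≤ (40:Int)
          · have eA : mucLoopA x [0,1,2,3,4,5,6,7] = some "30-40" := by
              simp only [mucLoopA]
              rw [if_neg (by omega : ¬ x ≤ (0:Int)*10)]
              rw [if_neg (by omega : ¬ x ≤ (1:Int)*10)]
              rw [if_neg (by omega : ¬ x ≤ (2:Int)*10)]
              rw [if_neg (by omega : ¬ x ≤ (3:Int)*10)]
              rw [if_pos (by omega)]
              rfl
            have hidx : -(PySem.Int.floordiv (-x) 10) = 4 := ceil10_eq x 4 (by omega) h4
            simp only [muc_dt_py, hr, eA, muc_dt_py_alt]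
            rw [hidx, if_neg h0, if_neg (not_not_intro (show x ≤ (70:Int) by omega))]
            decide
          · by_cases h5 : x ≤ (50:Int)
            · have eA : mucLoopA x [0,1,2,3,4,5,6,7] = some "40-50" := by
                simp only [mucLoopA]
                rw [if_neg (by omega : ¬ x ≤ (0:Int)*10)]
                rw [if_neg (by omega : ¬ x ≤ (1:Int)*10)]
                rw [if_neg (by omega : ¬ x ≤ (2:Int)*10)]
                rw [if_neg (by omega : ¬ x ≤ (3:Int)*10)]
                rw [if_neg (by omega : ¬ x ≤ (4:Int)*10)]
                rw [if_pos (by omega)]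
                rfl
              have hidx : -(PySem.Int.floordiv (-x) 10) = 5 := ceil10_eq x 5 (by omega) h5
              simp only [muc_dt_py, hr, eA, muc_dt_py_alt]
              rw [hidx, if_neg h0, if_neg (not_not_intro (show x ≤ (70:Int) by omega))]
              decide
            · by_cases h6 : x ≤ (60:Int)
              · have eA : mucLoopA x [0,1,2,3,4,5,6,7] = some "50-60" := by
                  simp only [mucLoopA]
                  rw [if_neg (by omega : ¬ x ≤ (0:Int)*10)]
                  rw [if_neg (by omega : ¬ x ≤ (1:Int)*10)]
                  rw [if_neg (by omega : ¬ x ≤ (2:Int)*10)]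
                  rw [if_neg (by omega : ¬ x ≤ (3:Int)*10)]
                  rw [if_neg (by omega : ¬ x ≤ (4:Int)*10)]
                  rw [if_neg (by omega : ¬ x ≤ (5:Int)*10)]
                  rw [if_pos (by omega)]
                  rfl
                have hidx : -(PySem.Int.floordiv (-x) 10) = 6 := ceil10_eq x 6 (by omega) h6
                simp only [muc_dt_py, hr, eA, muc_dt_py_alt]
                rw [hidx, if_neg h0, if_neg (not_not_intro (show x ≤ (70:Int) by omega))]
                decide
              · by_cases h7 : x ≤ (70:Int)
                · have eA : mucLoopA x [0,1,2,3,4,5,6,7] = some "60-70" := by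
                    simp only [mucLoopA]
                    rw [if_neg (by omega : ¬ x ≤ (0:Int)*10)]
                    rw [if_neg (by omega : ¬ x ≤ (1:Int)*10)]
                    rw [if_neg (by omega : ¬ x ≤ (2:Int)*10)]
                    rw [if_neg (by omega : ¬ x ≤ (3:Int)*10)]
                    rw [if_neg (by omega : ¬ x ≤ (4:Int)*10)]
                    rw [if_neg (by omega : ¬ x ≤ (5:Int)*10)]
                    rw [if_neg (by omega : ¬ x ≤ (6:Int)*10)]
                    rw [if_pos (by omega)]
                    rfl
                  have hidx : -(PySem.Int.floordiv (-x) 10) = 7 := ceil10_eq x 7 (by omega) h7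
                  simp only [muc_dt_py, hr, eA, muc_dt_py_alt]
                  rw [hidx, if_neg h0, if_neg (not_not_intro (show x ≤ (70:Int) by omega))]
                  decide
                · have eA : mucLoopA x [0,1,2,3,4,5,6,7] = none := by
                    simp only [mucLoopA]
                    rw [if_neg (by omega : ¬ x ≤ (0:Int)*10)]
                    rw [if_neg (by omega : ¬ x ≤ (1:Int)*10)]
                    rw [if_neg (by omega : ¬ x ≤ (2:Int)*10)]
                    rw [if_neg (by omega : ¬ x ≤ (3:Int)*10)]
                    rw [if_neg (by omega : ¬ x ≤ (4:Int)*10)]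
                    rw [if_neg (by omega : ¬ x ≤ (5:Int)*10)]
                    rw [if_neg (by omega : ¬ x ≤ (6:Int)*10)]
                    rw [if_neg (by omega : ¬ x ≤ (7:Int)*10)]
                  simp only [muc_dt_py, hr, eA, muc_dt_py_alt]
                  rw [if_neg h0, if_pos h7]
                  rfl
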